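-- pv_equiv track=rewrite | github.com/yonatan-h/competitive-programming | week16-after-admission/Detonate the Maximum .py | get_max_chain
-- ===== SOURCE A (Python) =====
-- def get_max_chain(adj_list):
--     max_chain = 1
--     nodes = list(adj_list.keys())
--     for node in nodes:
--         node_set = set()
--         count_under(node, adj_list, node_set)
--         chain_size = len(node_set)
--         max_chain = max(max_chain, chain_size)
--
--     return max_chain
--
-- def count_under(node, adj_list, node_set):
--     node_set.add(node)
--     for child in adj_list[node]:
--         if child  not in node_set:
--             count_under(child, adj_list, node_set)
-- ===== SOURCE B (Python) =====
-- def get_max_chain(adj_list):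
--     max_chain = 1
--     for node in list(adj_list.keys()):
--         visited = {node}
--         stack = [adj_list[node]]  # stack of frames: remaining-children lists
--         while stack:
--             frame = stack[-1]
--             if not frame:
--                 stack.pop()
--                 continue
--             child = frame[0]
--             stack[-1] = frame[1:]
--             if child not in visited:
--                 visited.add(child)
--                 stack.append(adj_list[child])
--         max_chain = max(max_chain, len(visited))
--     return max_chain
-- ===== Notes on version B (the rewrite author's own statement) =====
-- stated objective: alternative
-- what changed: The recursive count_under helper is replaced by an iterative DFS driven by an explicit stack of remaining-children frames, eliminating recursion while visiting nodes in the same order.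
import Mathlib
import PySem

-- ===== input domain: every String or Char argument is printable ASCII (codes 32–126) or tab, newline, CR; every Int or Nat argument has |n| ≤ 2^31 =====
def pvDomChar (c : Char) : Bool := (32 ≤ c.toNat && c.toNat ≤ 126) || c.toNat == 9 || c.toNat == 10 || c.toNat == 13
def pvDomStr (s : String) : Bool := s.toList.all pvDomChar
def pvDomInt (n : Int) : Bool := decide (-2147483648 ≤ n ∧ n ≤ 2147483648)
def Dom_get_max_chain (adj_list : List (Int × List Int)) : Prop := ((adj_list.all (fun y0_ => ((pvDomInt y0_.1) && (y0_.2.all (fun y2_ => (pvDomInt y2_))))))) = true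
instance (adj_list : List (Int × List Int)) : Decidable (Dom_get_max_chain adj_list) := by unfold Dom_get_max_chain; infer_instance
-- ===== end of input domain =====

-- B replaces the recursive count_under helper with an iterative DFS over an explicit stack of
-- remaining-children frames; objective: alternative decomposition (recursion eliminated).

-- ===== PORT A =====
-- adj_list[node]: dict lookup = first match in the association list; a missing key is a Python
-- KeyError — Pre_get_max_chain excludes exactly those inputs, so the `.getD []` guard never fires there.
def childrenA (adj : List (Int × List Int)) (n : Int) : List Int := (adj.lookup n).getD []

-- count_under(node, adj_list, node_set) of A, with the per-child for-loop as goA.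
-- Fuel is a totality guard only: one unit is spent per node added to the set, the remaining fuel is
-- threaded through, and the initial fuel fuelA is never exhausted on any input.  The `min r.2 f`
-- clamp only certifies termination: remaining fuel never increases (goA_fuel_le below), so it is r.2.
mutual
def countA (adj : List (Int × List Int)) : Nat → Int → PySem.Set Int → PySem.Set Int × Nat
  | 0, _, s => (s, 0)                                            -- fuel exhausted (unreachable)
  | f+1, n, s => goA adj f (childrenA adj n) (PySem.Set.add s n) -- node_set.add(node); loop over children
  termination_by f _ _ => (f, 0)
  decreasing_by all_goals (simp [Prod.lex_def]; try omega)

def goA (adj : List (Int × List Int)) : Nat → List Int → PySem.Set Int → PySem.Set Int × Nat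
  | f, [], s => (s, f)
  | f, c :: cs, s =>
      if !(PySem.Set.contains s c) then                          -- if child not in node_set:
        let r := countA adj f c s                                --   count_under(child, …)
        goA adj (min r.2 f) cs r.1
      else goA adj f cs s
  termination_by f cs _ => (f, cs.length + 1)
  decreasing_by all_goals (simp [Prod.lex_def]; try omega)
end

def fuelA (adj : List (Int × List Int)) : Nat :=
  adj.length + (adj.map (fun p => p.2.length)).sum + 1

def get_max_chain (adj_list : List (Int × List Int)) : Int :=
  -- nodes = list(adj_list.keys()): the distinct keys in first-occurrence order
  let nodes := PySem.List.dedup (adj_list.map Prod.fst)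
  nodes.foldl (fun max_chain node =>
    let node_set := (countA adj_list (fuelA adj_list) node PySem.Set.empty).1
    max max_chain (PySem.Set.len node_set)) 1

-- ===== PORT B =====
def childrenB (adj : List (Int × List Int)) (n : Int) : List Int := (adj.lookup n).getD []

-- the while-loop of B: stack of frames (remaining-children lists).  Fuel is a totality guard only,
-- spent once per node added to visited; the initial fuel fuelB is never exhausted on any input.
def loopB (adj : List (Int × List Int)) : Nat → List (List Int) → PySem.Set Int → PySem.Set Int
  | _, [], s => s                                                -- while stack:
  | f, [] :: stk, s => loopB adj f stk s                         -- empty frame: stack.pop()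
  | f, (c :: cs) :: stk, s =>                                    -- child = frame[0]; stack[-1] = frame[1:]
      if !(PySem.Set.contains s c) then                          -- if child not in visited:
        match f with
        | 0 => s                                                 -- fuel exhausted (unreachable)
        | f+1 => loopB adj f (childrenB adj c :: cs :: stk) (PySem.Set.add s c)
      else loopB adj f (cs :: stk) s
  termination_by f stk _ => (f, (stk.map List.length).sum, stk.length)
  decreasing_by all_goals (simp [Prod.lex_def]; try omega)

def fuelB (adj : List (Int × List Int)) : Nat :=
  adj.length + (adj.map (fun p => p.2.length)).sum

def get_max_chain_alt (adj_list : List (Int × List Int)) : Int :=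
  (PySem.List.dedup (adj_list.map Prod.fst)).foldl (fun max_chain node =>
    let visited := loopB adj_list (fuelB adj_list) [childrenB adj_list node]
                     (PySem.Set.add PySem.Set.empty node)
    max max_chain (PySem.Set.len visited)) 1

-- ===== PRECONDITION & SPEC =====
-- Pre_ excludes exactly the inputs where the Python raises KeyError: a child that is not a key is
-- reached by the traversal started from its parent key, and adj_list[child] then raises (in A and B alike).
def Pre_get_max_chain (adj_list : List (Int × List Int)) : Prop :=
  ∀ p ∈ adj_list, ∀ c ∈ p.2, c ∈ adj_list.map Prod.fst
instance (adj_list : List (Int × List Int)) : Decidable (Pre_get_max_chain adj_list) := by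
  unfold Pre_get_max_chain; infer_instance

def pvWitness_get_max_chain : (List (Int × List Int)) := [(0, [1, 0]), (1, [0]), (2, [])]

def Spec_get_max_chain (adj_list : List (Int × List Int)) (out : Int) : Prop := out = get_max_chain_alt adj_list
instance (adj_list : List (Int × List Int)) (out : Int) : Decidable (Spec_get_max_chain adj_list out) := by unfold Spec_get_max_chain; infer_instance

-- ===== CLAIM (what is proved, stated in full; the proofs are below) =====
def Claim_equal_get_max_chain : Prop := ∀ (adj_list : List (Int × List Int)), Dom_get_max_chain adj_list → Pre_get_max_chain adj_list → Spec_get_max_chain adj_list (get_max_chain adj_list)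

-- ===== LEMMAS AND PROOFS =====

-- remaining fuel never increases
theorem goA_fuel_le (adj : List (Int × List Int)) :
    ∀ (cs : List Int) (f : Nat) (s : PySem.Set Int), (goA adj f cs s).2 ≤ f := by
  intro cs
  induction cs with
  | nil => intro f s; rw [goA]
  | cons c cs ih =>
    intro f s
    rw [goA]
    by_cases h : PySem.Set.contains s c
    · simp only [h, Bool.not_true]
      simpa using ih f s
    · simp only [h, Bool.not_false, if_pos]
      exact le_trans (ih _ _) (Nat.min_le_right _ _)

-- with no fuel, A's loop changes nothing
theorem goA_zero (adj : List (Int × List Int)) :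
    ∀ (cs : List Int) (s : PySem.Set Int), goA adj 0 cs s = (s, 0) := by
  intro cs
  induction cs with
  | nil => intro s; rw [goA]
  | cons c cs ih =>
    intro s
    rw [goA]
    by_cases h : PySem.Set.contains s c
    · rw [if_neg (by rw [h]; simp)]
      exact ih s
    · rw [if_pos (by rw [Bool.eq_false_iff.mpr h]; rfl)]
      show goA adj (min (countA adj 0 c s).2 0) cs (countA adj 0 c s).1 = _
      rw [countA]
      simpa using ih s

-- with no fuel, B's loop changes nothing
theorem loopB_zero (adj : List (Int × List Int)) :
    ∀ (stk : List (List Int)) (s : PySem.Set Int), loopB adj 0 stk s = s := by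
  suffices h : ∀ (f : Nat) (stk : List (List Int)) (s : PySem.Set Int), f = 0 → loopB adj f stk s = s by
    intro stk s; exact h 0 stk s rfl
  intro f stk s
  fun_induction loopB adj f stk s <;> simp_all

-- the bisimulation: processing one frame of B's stack is exactly A's child loop
theorem loopB_eq_goA (adj : List (Int × List Int)) :
    ∀ (f : Nat) (cs : List Int) (stk : List (List Int)) (s : PySem.Set Int),
      loopB adj f (cs :: stk) s = loopB adj (goA adj f cs s).2 stk (goA adj f cs s).1 := by
  intro f
  induction f using Nat.strong_induction_on with
  | _ f IH =>
    intro cs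
    induction cs with
    | nil =>
      intro stk s
      rw [goA]
      conv_lhs => rw [loopB.eq_def]
    | cons c cs ih =>
      intro stk s
      rw [goA]
      conv_lhs => rw [loopB.eq_def]
      by_cases h : PySem.Set.contains s c
      · simp only [h, Bool.not_true, Bool.false_eq_true]
        exact ih stk s
      
      · simp only [h, Bool.not_false, if_pos]
        match f with
        | 0 =>
          simp [countA, goA_zero, loopB_zero]
        | f+1 =>
          have hg : (goA adj f (childrenA adj c) (PySem.Set.add s c)).2 ≤ f :=
            goA_fuel_le adj _ _ _
          show loopB adj f (childrenA adj c :: cs :: stk) (PySem.Set.add s c)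
              = loopB adj (goA adj (min (countA adj (f+1) c s).2 (f+1)) cs (countA adj (f+1) c s).1).2 stk
                  (goA adj (min (countA adj (f+1) c s).2 (f+1)) cs (countA adj (f+1) c s).1).1
          rw [IH f (Nat.lt_succ_self f) (childrenA adj c) (cs :: stk) (PySem.Set.add s c)]
          rw [countA]
          rw [Nat.min_eq_left (le_trans hg (Nat.le_succ f))]
          exact IH _ (Nat.lt_succ_of_le hg) cs stk _

-- B's loop on an exhausted stack returns the set unchanged
theorem loopB_nil (adj : List (Int × List Int)) (f : Nat) (s : PySem.Set Int) :
    loopB adj f [] s = s := by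
  rw [loopB.eq_def]

-- per start node, B's visited set is literally A's node_set
theorem perStart (adj : List (Int × List Int)) (n : Int) :
    loopB adj (fuelB adj) [childrenB adj n] (PySem.Set.add PySem.Set.empty n)
      = (countA adj (fuelA adj) n PySem.Set.empty).1 := by
  have hA : fuelA adj = fuelB adj + 1 := rfl
  rw [hA, loopB_eq_goA, countA, show childrenB adj = childrenA adj from rfl, loopB_nil]

-- ===== VERDICT (by name: the statement is the Claim_ definition above) =====
theorem get_max_chain_spec : Claim_equal_get_max_chain := by
  intro adj _ _
  unfold Spec_get_max_chain get_max_chain get_max_chain_alt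
  simp only [perStart]
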